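-- pv_equiv track=rewrite | github.com/ctamisier/naviglass-tools | naviglass-fetch.py | int_to_code
-- ===== SOURCE A (Python) =====
-- ALPHABET = "0123456789ACEFHK"
--
-- def int_to_code(n: int, length: int) -> str:
--     """Convertit un entier en code Naviglass de longueur fixe."""
--     digits = []
--     for _ in range(length):
--         digits.append(ALPHABET[n % 16])
--         n //= 16
--     if n != 0:
--         raise OverflowError("L'entier est trop grand pour la longueur de code demandee.")
--     return "".join(reversed(digits))
-- ===== SOURCE B (Python) =====
-- ALPHABET = "0123456789ACEFHK"
--
-- def int_to_code(n: int, length: int) -> str: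
--     """Convertit un entier en code Naviglass de longueur fixe."""
--     if n < 0 or n >> (4 * max(length, 0)) != 0:
--         raise OverflowError("L'entier est trop grand pour la longueur de code demandee.")
--     return "".join(ALPHABET[(n >> (4 * (length - 1 - i))) & 15] for i in range(length))
-- ===== Notes on version B (the rewrite author's own statement) =====
-- stated objective: alternative
-- what changed: B replaces A's LSB-first divide-by-16 accumulator loop with trailing residue check and a final reverse by an upfront closed-form bound check (n >> 4*length == 0) plus direct MSB-first digit extraction by shift-and-mask, with no mutable residue, no digit list and no reversal.
import Mathlib
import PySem

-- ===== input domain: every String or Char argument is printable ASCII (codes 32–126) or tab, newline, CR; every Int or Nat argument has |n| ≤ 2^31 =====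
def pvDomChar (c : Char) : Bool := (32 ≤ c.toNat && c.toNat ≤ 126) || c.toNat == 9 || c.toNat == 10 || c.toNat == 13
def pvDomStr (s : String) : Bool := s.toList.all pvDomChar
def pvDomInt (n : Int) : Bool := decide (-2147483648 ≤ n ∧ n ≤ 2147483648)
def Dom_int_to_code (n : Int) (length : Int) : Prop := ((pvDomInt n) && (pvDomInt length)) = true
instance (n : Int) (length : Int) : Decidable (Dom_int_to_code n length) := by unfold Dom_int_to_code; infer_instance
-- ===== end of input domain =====

-- B builds the code most-significant digit first by a closed-form digit formula (n // 16^(length-1-i)) % 16,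
-- instead of A's divide-by-16 accumulator loop plus a final reverse; objective: simpler, not faster.

-- ===== PORT A =====
def pvAlpha : List Char := "0123456789ACEFHK".toList

def int_to_code (n : Int) (length : Int) : String :=
  let st := (PySem.List.pyRange 0 length 1).foldl
    (fun (st : List Char × Int) _ =>
      (st.1 ++ [PySem.List.pyGetD pvAlpha (PySem.Int.mod st.2 16) ' '],
       PySem.Int.floordiv st.2 16)) ([], n)
  -- A raises OverflowError when the residue st.2 ≠ 0; those inputs are outside Pre_int_to_code.
  String.mk st.1.reverse

-- ===== PORT B =====
def int_to_code_alt (n : Int) (length : Int) : String :=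
  -- B raises OverflowError exactly when n < 0 or n >> 4*max(length,0) ≠ 0; those inputs are outside Pre_int_to_code.
  String.mk ((PySem.List.pyRange 0 length 1).map (fun i =>
    PySem.List.pyGetD pvAlpha
      (PySem.Int.band (n >>> (4 * (length - 1 - i)).toNat) 15) ' '))

-- ===== PRECONDITION & SPEC =====
-- exactly the inputs on which A returns (otherwise A raises OverflowError)
def Pre_int_to_code (n : Int) (length : Int) : Prop := 0 ≤ n ∧ n < 16 ^ length.toNat
instance (n : Int) (length : Int) : Decidable (Pre_int_to_code n length) := by unfold Pre_int_to_code; infer_instance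
def pvWitness_int_to_code : Int × Int := (3054, 4)

def Spec_int_to_code (n : Int) (length : Int) (out : String) : Prop := out = int_to_code_alt n length
instance (n : Int) (length : Int) (out : String) : Decidable (Spec_int_to_code n length out) := by unfold Spec_int_to_code; infer_instance

-- ===== CLAIM (what is proved, stated in full; the proofs are below) =====
def Claim_equal_int_to_code : Prop := ∀ (n : Int) (length : Int), Dom_int_to_code n length → Pre_int_to_code n length → Spec_int_to_code n length (int_to_code n length)

-- ===== LEMMAS AND PROOFS =====

-- A's loop over range L, started at (acc, m), appends the base-16 digits of m LSB-first
-- and leaves residue m // 16^L.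
theorem pv_foldA (L : Nat) (m : Int) (acc : List Char) :
    (List.range L).foldl
      (fun (st : List Char × Int) _ =>
        (st.1 ++ [PySem.List.pyGetD pvAlpha (PySem.Int.mod st.2 16) ' '],
         PySem.Int.floordiv st.2 16)) (acc, m)
    = (acc ++ (List.range L).map (fun j =>
          PySem.List.pyGetD pvAlpha
            (PySem.Int.mod (PySem.Int.floordiv m (16 ^ j)) 16) ' '),
       PySem.Int.floordiv m (16 ^ L)) := by
  induction L with
  | zero =>
    simp [PySem.Int.floordiv]
  | succ L ih =>
    rw [List.range_succ, List.foldl_append, ih]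
    simp only [List.foldl_cons, List.foldl_nil, List.map_append, List.map_cons, List.map_nil,
      List.append_assoc]
    congr 1
    rw [PySem.Int.floordiv_eq_ediv_of_pos (by positivity),
      PySem.Int.floordiv_eq_ediv_of_pos (by positivity),
      Int.ediv_ediv_of_nonneg (by positivity), pow_succ,
      PySem.Int.floordiv_eq_ediv_of_pos (by positivity)]

-- B's shifted-and-masked digit IS the division-based digit of pv_foldA (for a nonnegative n = ↑m).
theorem pv_digit (m j : Nat) :
    PySem.Int.band ((m:Int) >>> (4*j)) 15
      = PySem.Int.mod (PySem.Int.floordiv (m:Int) (16^j)) 16 := by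
  have hs : ((m:Int) >>> (4*j)) = ((m >>> (4*j) : Nat) : Int) :=
    (Int.natCast_shiftRight m (4*j)).symm
  have h16 : ((16:Int)^j) = (((16^j : Nat)) : Int) := by push_cast; ring
  rw [hs, h16, PySem.Int.floordiv_natCast]
  have h16b : (16:Int) = ((16:Nat):Int) := by norm_num
  have h15 : (15:Int) = ((15:Nat):Int) := by norm_num
  rw [h16b, PySem.Int.mod_natCast, h15, PySem.Int.band_natCast]
  congr 1
  rw [Nat.shiftRight_eq_div_pow]
  have h2 : (2:Nat)^(4*j) = 16^j := by rw [pow_mul]; norm_num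
  rw [h2]
  have := Nat.and_two_pow_sub_one_eq_mod (m / 16^j) 4
  norm_num at this
  omega

theorem int_to_code_eq (n length : Int) (hn : 0 ≤ n) :
    int_to_code n length = int_to_code_alt n length := by
  obtain ⟨m, rfl⟩ := Int.eq_ofNat_of_zero_le hn
  unfold int_to_code int_to_code_alt
  rw [PySem.List.pyRange_one]
  simp only [Int.sub_zero, List.foldl_map, pv_foldA, List.nil_append, List.map_map]
  apply congrArg String.mk
  apply List.ext_getElem
  · simp
  · intro i h1 h2
    simp only [List.length_reverse, List.length_map, List.length_range] at h1
    rw [List.getElem_reverse]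
    simp only [List.getElem_map, List.getElem_range, Function.comp_apply]
    have he : (4 * (length - 1 - ((0:Int) + (i:Int)))).toNat
        = 4 * (length.toNat - 1 - i) := by omega
    rw [he, pv_digit m (length.toNat - 1 - i)]
    congr 3
    simp only [List.length_map, List.length_range]

-- ===== VERDICT (by name: the statement is the Claim_ definition above) =====
theorem int_to_code_spec : Claim_equal_int_to_code := by
  intro n length _ hpre
  exact int_to_code_eq n length hpre.1
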